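-- pv_equiv track=rewrite | github.com/consultant-1379/infra-openstack | cloud_automation/roles/network/module_utils/filter.py | _remove_unvanted_chars
-- ===== SOURCE A (Python) =====
-- def _remove_unvanted_chars(port):
--     result = ''
--     for char in port:
--         if char.isdigit():
--             result = result + char
--         else:
--             break
--     if port[-1] == 'g':
--         result = result + 'g'
--
--     return result
-- ===== SOURCE B (Python) =====
-- import re
--
-- def _remove_unvanted_chars(port):
--     result = re.match(r'\d*', port).group()
--     if port[-1] == 'g':
--         result = result + 'g'
--     return result
-- ===== Notes on version B (the rewrite author's own statement) =====
-- stated objective: idiomatic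
-- what changed: Replaces the character-by-character accumulation loop with early break by a single regex match extracting the leading digit run; the trailing-'g' check is unchanged.
import Mathlib
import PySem

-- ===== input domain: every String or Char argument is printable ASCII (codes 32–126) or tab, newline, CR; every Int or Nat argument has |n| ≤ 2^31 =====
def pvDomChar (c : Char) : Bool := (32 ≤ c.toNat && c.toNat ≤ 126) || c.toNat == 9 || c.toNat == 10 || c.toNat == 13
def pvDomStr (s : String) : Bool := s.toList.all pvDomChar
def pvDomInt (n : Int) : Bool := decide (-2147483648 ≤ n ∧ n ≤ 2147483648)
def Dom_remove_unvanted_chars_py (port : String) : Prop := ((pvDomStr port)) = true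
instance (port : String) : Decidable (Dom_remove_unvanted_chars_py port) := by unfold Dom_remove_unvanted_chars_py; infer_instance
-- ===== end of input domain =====

-- B replaces the manual accumulate-until-non-digit loop by a regex leading-digit-run
-- extraction (ported as takeWhile); same cost, more idiomatic.

-- ===== PORT A =====
-- the for-loop with early break: accumulate digit chars, stop at the first non-digit
def pvLoopA : List Char → List Char → List Char
  | acc, [] => acc
  | acc, c :: cs => if PySem.Chars.isdigit c then pvLoopA (acc ++ [c]) cs else acc

def remove_unvanted_chars_py (port : String) : String :=
  let result := pvLoopA [] port.toList
  -- port[-1] == 'g'  (IndexError on empty port is excluded by Pre_)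
  match PySem.List.pyGet? port.toList (-1) with
  | some c => if c = 'g' then String.mk (result ++ ['g']) else String.mk result
  | none => String.mk result

-- ===== PORT B =====
-- re.match(r'\d*', port).group() = the leading run of digit characters
def remove_unvanted_chars_py_alt (port : String) : String :=
  let result := port.toList.takeWhile PySem.Chars.isdigit
  match PySem.List.pyGet? port.toList (-1) with
  | some c => if c = 'g' then String.mk (result ++ ['g']) else String.mk result
  | none => String.mk result

-- ===== PRECONDITION & SPEC =====
-- A raises IndexError at port[-1] on the empty string (B raises there too); excluded.
def Pre_remove_unvanted_chars_py (port : String) : Prop := port ≠ ""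
instance (port : String) : Decidable (Pre_remove_unvanted_chars_py port) := by unfold Pre_remove_unvanted_chars_py; infer_instance
def pvWitness_remove_unvanted_chars_py : String := "123g"

def Spec_remove_unvanted_chars_py (port : String) (out : String) : Prop := out = remove_unvanted_chars_py_alt port
instance (port : String) (out : String) : Decidable (Spec_remove_unvanted_chars_py port out) := by unfold Spec_remove_unvanted_chars_py; infer_instance

-- ===== CLAIM (what is proved, stated in full; the proofs are below) =====
def Claim_equal_remove_unvanted_chars_py : Prop := ∀ (port : String), Dom_remove_unvanted_chars_py port → Pre_remove_unvanted_chars_py port → Spec_remove_unvanted_chars_py port (remove_unvanted_chars_py port)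

-- ===== LEMMAS AND PROOFS =====
theorem pvLoopA_eq_takeWhile (l acc : List Char) :
    pvLoopA acc l = acc ++ l.takeWhile PySem.Chars.isdigit := by
  induction l generalizing acc with
  | nil => simp [pvLoopA]
  | cons c cs ih =>
    simp only [pvLoopA, List.takeWhile]
    by_cases h : PySem.Chars.isdigit c
    · simp [h, ih]
    · simp [h]

-- ===== VERDICT (by name: the statement is the Claim_ definition above) =====
theorem remove_unvanted_chars_py_spec : Claim_equal_remove_unvanted_chars_py := by
  intro port _ _
  unfold Spec_remove_unvanted_chars_py remove_unvanted_chars_py remove_unvanted_chars_py_alt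
  rw [pvLoopA_eq_takeWhile]
  simp
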